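-- pv_equiv track=rewrite | github.com/rampeace/MyLearning | MyLearning/PythonPractice/dsa_practice/sliding_window/sub_array_sum.py | calculate_sum_between_two_indices
-- ===== SOURCE A (Python) =====
-- def calculate_sum_between_two_indices(nums=None, start=0, end=2):
--     """Return the sum between two indices using prefix sums."""
--     if nums is None:
--         nums = [10, 20, 5, 15]
--
--     if not nums or start < 0 or end >= len(nums) or start > end:
--         return 0
--
--     prefix_sum = [0] * len(nums)
--     prefix_sum[0] = nums[0]
--
--     for i in range(1, len(nums)):
--         prefix_sum[i] = prefix_sum[i - 1] + nums[i]
--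
--     if start == 0:
--         return prefix_sum[end]
--     return prefix_sum[end] - prefix_sum[start - 1]
-- ===== SOURCE B (Python) =====
-- def calculate_sum_between_two_indices(nums=None, start=0, end=2):
--     """Return the sum between two indices by summing the slice directly."""
--     if nums is None:
--         nums = [10, 20, 5, 15]
--     if not nums or start < 0 or end >= len(nums) or start > end:
--         return 0
--     return sum(nums[start:end + 1])
-- ===== Notes on version B (the rewrite author's own statement) =====
-- stated objective: simpler
-- what changed: Drops the full prefix-sum table and the subtraction; after the same guard, B just sums the slice nums[start:end+1] directly.
import Mathlib
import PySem

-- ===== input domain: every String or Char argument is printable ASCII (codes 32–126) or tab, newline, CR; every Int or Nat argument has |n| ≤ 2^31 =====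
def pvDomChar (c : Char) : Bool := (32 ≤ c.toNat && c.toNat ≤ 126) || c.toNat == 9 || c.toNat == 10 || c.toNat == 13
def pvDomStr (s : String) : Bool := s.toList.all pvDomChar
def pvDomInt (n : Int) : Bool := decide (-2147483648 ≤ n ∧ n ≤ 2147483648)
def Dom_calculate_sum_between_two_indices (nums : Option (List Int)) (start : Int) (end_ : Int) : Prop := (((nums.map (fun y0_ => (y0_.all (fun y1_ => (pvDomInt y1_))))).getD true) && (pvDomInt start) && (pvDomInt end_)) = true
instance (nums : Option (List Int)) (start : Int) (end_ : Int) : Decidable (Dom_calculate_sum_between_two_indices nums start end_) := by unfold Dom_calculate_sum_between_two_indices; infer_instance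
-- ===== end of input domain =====

-- B replaces A's full prefix-sum table and subtraction by summing the slice nums[start:end+1]
-- directly after the identical guard (objective: simpler). Equivalence proved on all inputs (A is total).

-- ===== PORT A =====
-- literal transliteration of A: default list, guard, prefix-sum table built by a loop over
-- range(1, len(nums)), then a lookup (or a difference of two lookups).
-- pyGetD/pySetD are used with default 0 / identity fallback; every index the code reaches is in
-- range (guaranteed by the guard), where they are exact for Python's nums[i] / prefix_sum[i] = v.
def calculate_sum_between_two_indices (nums : Option (List Int)) (start : Int) (end_ : Int) : Int :=
  let ns := nums.getD [10, 20, 5, 15]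
  if ns = [] ∨ start < 0 ∨ end_ ≥ (ns.length : Int) ∨ start > end_ then 0
  else
    let pref0 := PySem.List.pySetD (List.replicate ns.length (0 : Int)) 0 (PySem.List.pyGetD ns 0 0)
    let pref := (PySem.List.pyRange 1 (ns.length : Int) 1).foldl
      (fun ps i => PySem.List.pySetD ps i (PySem.List.pyGetD ps (i - 1) 0 + PySem.List.pyGetD ns i 0)) pref0
    if start = 0 then PySem.List.pyGetD pref end_ 0
    else PySem.List.pyGetD pref end_ 0 - PySem.List.pyGetD pref (start - 1) 0

-- ===== PORT B =====
-- literal transliteration of B: same guard, then sum(nums[start:end+1]).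
def calculate_sum_between_two_indices_alt (nums : Option (List Int)) (start : Int) (end_ : Int) : Int :=
  let ns := nums.getD [10, 20, 5, 15]
  if ns = [] ∨ start < 0 ∨ end_ ≥ (ns.length : Int) ∨ start > end_ then 0
  else (PySem.List.slice ns (some start) (some (end_ + 1))).sum

-- ===== PRECONDITION & SPEC =====
def Spec_calculate_sum_between_two_indices (nums : Option (List Int)) (start : Int) (end_ : Int) (out : Int) : Prop := out = calculate_sum_between_two_indices_alt nums start end_
instance (nums : Option (List Int)) (start : Int) (end_ : Int) (out : Int) : Decidable (Spec_calculate_sum_between_two_indices nums start end_ out) := by unfold Spec_calculate_sum_between_two_indices; infer_instance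

-- ===== CLAIM (what is proved, stated in full; the proofs are below) =====
def Claim_equal_calculate_sum_between_two_indices : Prop := ∀ (nums : Option (List Int)) (start : Int) (end_ : Int), Dom_calculate_sum_between_two_indices nums start end_ → Spec_calculate_sum_between_two_indices nums start end_ (calculate_sum_between_two_indices nums start end_)

-- ===== LEMMAS AND PROOFS =====

-- Loop invariant: after A's loop has processed range(1, k), the table holds the prefix sums
-- for indices < k and untouched zeros beyond.
theorem pv_loop_inv (ns : List Int) (hne : ns ≠ []) (k : Nat) (h1 : 1 ≤ k) (hk : k ≤ ns.length) :
    (PySem.List.pyRange 1 (k : Int) 1).foldl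
      (fun ps i => PySem.List.pySetD ps i (PySem.List.pyGetD ps (i - 1) 0 + PySem.List.pyGetD ns i 0))
      (PySem.List.pySetD (List.replicate ns.length (0 : Int)) 0 (PySem.List.pyGetD ns 0 0))
    = (List.range k).map (fun i => (ns.take (i + 1)).sum) ++ List.replicate (ns.length - k) 0 := by
  induction k with
  | zero => omega
  | succ k ih =>
    rcases Nat.lt_or_ge k 1 with hk1 | hk1
    · -- k = 0 : base case, range(1,1) is empty
      have hk0 : k = 0 := by omega
      subst hk0
      have h11 : PySem.List.pyRange 1 ((0 + 1 : Nat) : Int) 1 = [] := PySem.List.pyRange_one_eq_nil (by norm_num)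
      rw [h11]
      cases ns with
      | nil => exact absurd rfl hne
      | cons a t =>
        simp [PySem.List.pySetD_of_nonneg, PySem.List.pyGetD_zero_cons, List.replicate_succ]
    · -- step: split range(1, k+1) as range(1, k) ++ [k]
      have hrange : PySem.List.pyRange 1 ((k : Int) + 1) 1 = PySem.List.pyRange 1 (k : Int) 1 ++ [(k : Int)] :=
        PySem.List.pyRange_one_succ_right (by omega)
      have hcast : ((k + 1 : Nat) : Int) = (k : Int) + 1 := by push_cast; ring
      rw [hcast, hrange, List.foldl_append, ih hk1 (by omega)]
      set M := (List.range k).map (fun i => (ns.take (i + 1)).sum) with hM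
      have hMlen : M.length = k := by simp [hM]
      have hkn : k < ns.length := by omega
      -- the value written at index k
      have hget1 : PySem.List.pyGetD (M ++ List.replicate (ns.length - k) 0) ((k : Int) - 1) 0
          = (ns.take k).sum := by
        have : ((k : Int) - 1) = ((k - 1 : Nat) : Int) := by omega
        rw [this, PySem.List.pyGetD_natCast]
        have hlt : k - 1 < M.length := by omega
        rw [List.getD_eq_getElem _ _ (by rw [List.length_append, hMlen, List.length_replicate]; omega)]
        rw [List.getElem_append_left hlt]
        simp only [hM, List.getElem_map, List.getElem_range]
        have hkk : k - 1 + 1 = k := by omega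
        rw [hkk]
      have hget2 : PySem.List.pyGetD ns (k : Int) 0 = ns[k] := by
        rw [PySem.List.pyGetD_natCast, List.getD_eq_getElem _ _ hkn]
      simp only [List.foldl_cons, List.foldl_nil]
      rw [hget1, hget2, PySem.List.pySetD_natCast]
      have hsum : (ns.take k).sum + ns[k] = (ns.take (k + 1)).sum := (List.sum_take_succ ns k hkn).symm
      -- set at index k = M.length lands at the head of the replicate block
      have hrep : List.replicate (ns.length - k) (0 : Int) = 0 :: List.replicate (ns.length - (k + 1)) 0 := by
        have : ns.length - k = (ns.length - (k + 1)) + 1 := by omega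
        rw [this, List.replicate_succ]
      rw [hrep, List.set_append]
      simp only [hMlen, lt_self_iff_false, if_false, Nat.sub_self, List.set_cons_zero]
      rw [hsum]
      simp [hM, List.range_succ]

-- ===== VERDICT (by name: the statement is the Claim_ definition above) =====
theorem calculate_sum_between_two_indices_spec : Claim_equal_calculate_sum_between_two_indices := by
  intro nums start end_ _
  unfold Spec_calculate_sum_between_two_indices
  unfold calculate_sum_between_two_indices calculate_sum_between_two_indices_alt
  set ns := nums.getD [10, 20, 5, 15] with hns
  by_cases hg : ns = [] ∨ start < 0 ∨ end_ ≥ (ns.length : Int) ∨ start > end_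
  · simp [hg]
  · simp only [hg, if_false]
    push Not at hg
    obtain ⟨hne, hs0, hel, hse⟩ := hg
    have hn1 : 1 ≤ ns.length := List.length_pos_iff.mpr hne
    have hP := pv_loop_inv ns hne ns.length hn1 le_rfl
    simp only [Nat.sub_self, List.replicate_zero, List.append_nil] at hP
    rw [hP]
    have hee : end_ = (end_.toNat : Int) := by omega
    have heln : end_.toNat < ns.length := by omega
    have hgetE : PySem.List.pyGetD ((List.range ns.length).map (fun i => (ns.take (i + 1)).sum)) end_ 0
        = (ns.take (end_.toNat + 1)).sum := by
      rw [PySem.List.pyGetD_of_nonneg _ _ (by omega), List.getD_eq_getElem _ _ (by simp only [List.length_map, List.length_range]; omega)]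
      simp
    have hslice : PySem.List.slice ns (some start) (some (end_ + 1)) =
        (ns.drop start.toNat).take (end_.toNat + 1 - start.toNat) := by
      rw [PySem.List.slice_toNat _ hs0 (by omega)]
      congr 1
      omega
    by_cases hst : start = 0
    · rw [hst] at hslice
      simp only [hst, if_true]
      rw [hgetE, hslice]
      simp only [Int.toNat_zero, List.drop_zero, Nat.sub_zero]
    · simp only [hst, if_false]
      rw [hgetE, hslice]
      have hs1 : 1 ≤ start.toNat := by omega
      have hgetS : PySem.List.pyGetD ((List.range ns.length).map (fun i => (ns.take (i + 1)).sum)) (start - 1) 0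
          = (ns.take start.toNat).sum := by
        rw [PySem.List.pyGetD_of_nonneg _ _ (by omega), List.getD_eq_getElem _ _ (by simp only [List.length_map, List.length_range]; omega)]
        simp only [List.getElem_map, List.getElem_range]
        congr 2
        omega
      rw [hgetS]
      have hsplit : ns.take (end_.toNat + 1) = ns.take start.toNat ++ (ns.drop start.toNat).take (end_.toNat + 1 - start.toNat) := by
        rw [← List.take_add]
        congr 1
        omega
      have := congrArg List.sum hsplit
      simp only [List.sum_append] at this
      omega
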